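-- pv_equiv track=rewrite | github.com/sixtwosix/AdventOfCalender | Day14/Python/Challenge1.py | quadrants_calculation
-- ===== SOURCE A (Python) =====
-- y_limits = (0,103)
--
-- x_limits = (0,101)
--
-- def quadrants_calculation(robots_pos):
--
--     # x_line = round(x_limits[1]/2)-1
--     # y_line = round(y_limits[1]/2)-1
--     x_line = x_limits[1] // 2
--     y_line = y_limits[1] // 2
--
--     # totals = [0,0,0,0]
--     totals = [[],[],[],[]]
--
--     for pos in robots_pos:
--         if(pos[0] < x_line):
--             if(pos[1] < y_line):
--                 # totals[0] = totals[0] + 1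
--                 totals[0].append(pos)
--             elif(pos[1] > y_line):
--                 # totals[2] = totals[2] + 1
--                 totals[2].append(pos)
--         elif(pos[0] > x_line):
--             if(pos[1] < y_line):
--                 # totals[1] = totals[1] + 1
--                 totals[1].append(pos)
--             elif(pos[1] > y_line):
--                 # totals[3] = totals[3] + 1
--                 totals[3].append(pos)
--
--     return totals
-- ===== SOURCE B (Python) =====
-- y_limits = (0, 103)
--
-- x_limits = (0, 101)
--
-- def quadrants_calculation(robots_pos):
--     x_line = x_limits[1] // 2
--     y_line = y_limits[1] // 2
--     return [
--         [p for p in robots_pos if p[0] < x_line and p[1] < y_line],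
--         [p for p in robots_pos if p[0] > x_line and p[1] < y_line],
--         [p for p in robots_pos if p[0] < x_line and p[1] > y_line],
--         [p for p in robots_pos if p[0] > x_line and p[1] > y_line],
--     ]
-- ===== Notes on version B (the rewrite author's own statement) =====
-- stated objective: simpler
-- what changed: Replaced the single loop mutating four accumulator lists through nested if/elif with four independent filter comprehensions, one per quadrant, returned directly.
import Mathlib
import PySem

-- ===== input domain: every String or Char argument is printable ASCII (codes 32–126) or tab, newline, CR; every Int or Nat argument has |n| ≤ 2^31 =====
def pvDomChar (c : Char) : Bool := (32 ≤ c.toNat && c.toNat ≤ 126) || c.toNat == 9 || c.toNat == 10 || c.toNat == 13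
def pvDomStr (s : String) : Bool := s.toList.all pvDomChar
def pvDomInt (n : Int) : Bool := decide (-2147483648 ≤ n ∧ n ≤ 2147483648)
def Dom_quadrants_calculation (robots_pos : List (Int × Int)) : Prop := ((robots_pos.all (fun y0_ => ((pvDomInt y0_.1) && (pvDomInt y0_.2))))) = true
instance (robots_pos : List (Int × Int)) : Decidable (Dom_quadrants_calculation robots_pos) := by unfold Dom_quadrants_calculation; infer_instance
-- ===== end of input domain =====

-- B replaces A's one loop mutating four accumulators via nested if/elif with four
-- independent per-quadrant filters (simpler decomposition; same O(n) cost).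

-- ===== PORT A =====
-- one loop step of A: appends pos to the matching quadrant of the 4 accumulators
def pvQuadStepA (xLine yLine : Int) (totals : List (Int × Int) × List (Int × Int) × List (Int × Int) × List (Int × Int))
    (pos : Int × Int) : List (Int × Int) × List (Int × Int) × List (Int × Int) × List (Int × Int) :=
  if pos.1 < xLine then
    if pos.2 < yLine then (totals.1 ++ [pos], totals.2.1, totals.2.2.1, totals.2.2.2)
    else if pos.2 > yLine then (totals.1, totals.2.1, totals.2.2.1 ++ [pos], totals.2.2.2)
    else totals
  else if pos.1 > xLine then
    if pos.2 < yLine then (totals.1, totals.2.1 ++ [pos], totals.2.2.1, totals.2.2.2)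
    else if pos.2 > yLine then (totals.1, totals.2.1, totals.2.2.1, totals.2.2.2 ++ [pos])
    else totals
  else totals

def quadrants_calculation (robots_pos : List (Int × Int)) : List (List (Int × Int)) :=
  let xLine := PySem.Int.floordiv 101 2
  let yLine := PySem.Int.floordiv 103 2
  let totals := robots_pos.foldl (pvQuadStepA xLine yLine) ([], [], [], [])
  [totals.1, totals.2.1, totals.2.2.1, totals.2.2.2]

-- ===== PORT B =====
def quadrants_calculation_alt (robots_pos : List (Int × Int)) : List (List (Int × Int)) :=
  let xLine := PySem.Int.floordiv 101 2
  let yLine := PySem.Int.floordiv 103 2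
  [ robots_pos.filter (fun p => p.1 < xLine && p.2 < yLine),
    robots_pos.filter (fun p => p.1 > xLine && p.2 < yLine),
    robots_pos.filter (fun p => p.1 < xLine && p.2 > yLine),
    robots_pos.filter (fun p => p.1 > xLine && p.2 > yLine) ]

-- ===== PRECONDITION & SPEC =====
def Spec_quadrants_calculation (robots_pos : List (Int × Int)) (out : List (List (Int × Int))) : Prop := out = quadrants_calculation_alt robots_pos
instance (robots_pos : List (Int × Int)) (out : List (List (Int × Int))) : Decidable (Spec_quadrants_calculation robots_pos out) := by unfold Spec_quadrants_calculation; infer_instance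

-- ===== CLAIM (what is proved, stated in full; the proofs are below) =====
def Claim_equal_quadrants_calculation : Prop := ∀ (robots_pos : List (Int × Int)), Dom_quadrants_calculation robots_pos → Spec_quadrants_calculation robots_pos (quadrants_calculation robots_pos)

-- ===== LEMMAS AND PROOFS =====
-- loop invariant: A's fold appends exactly the four filters to whatever accumulators it starts from
theorem pvQuadFold_eq (xLine yLine : Int) (l : List (Int × Int))
    (a b c d : List (Int × Int)) :
    l.foldl (pvQuadStepA xLine yLine) (a, b, c, d) =
      (a ++ l.filter (fun p => p.1 < xLine && p.2 < yLine),
       b ++ l.filter (fun p => p.1 > xLine && p.2 < yLine),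
       c ++ l.filter (fun p => p.1 < xLine && p.2 > yLine),
       d ++ l.filter (fun p => p.1 > xLine && p.2 > yLine)) := by
  induction l generalizing a b c d with
  | nil => simp
  | cons p l ih =>
    simp only [List.foldl_cons, List.filter_cons, pvQuadStepA]
    rcases p with ⟨x, y⟩
    by_cases h1 : x < xLine <;> by_cases h2 : y < yLine <;> by_cases h3 : y > yLine <;>
      by_cases h4 : x > xLine <;>
      first
        | omega
        | (simp only [h1, h2, h3, h4, if_pos, if_neg, not_false_eq_true,
             decide_true, decide_false, Bool.true_and, Bool.false_and, ih]
           simp [List.append_assoc])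

-- ===== VERDICT (by name: the statement is the Claim_ definition above) =====
theorem quadrants_calculation_spec : Claim_equal_quadrants_calculation := by
  intro robots_pos _
  unfold Spec_quadrants_calculation quadrants_calculation quadrants_calculation_alt
  simp [pvQuadFold_eq]
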